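-- pv_equiv track=rewrite | github.com/pombredanne/nasl-tracer | trace.py | offset
-- ===== SOURCE A (Python) =====
-- def offset(frame_stack, focii):
--     # When finding the depth of detail to provide, we want to find this
--     # relative to the most recent occurrence of the function in focus.
--     # frame_stack[0] is ("MAIN",_)
--     fs = [x for (x, _) in frame_stack[::-1]]
--     off = 0
--     for frame in fs:
--         if (frame in focii):
--             return off
--         else:
--             off += 1
--     return len(fs)
-- ===== SOURCE B (Python) =====
-- def offset(frame_stack, focii):
--     last = -1
--     for j, (name, _) in enumerate(frame_stack):
--         if name in focii:
--             last = j
--     return len(frame_stack) - 1 - last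
-- ===== Notes on version B (the rewrite author's own statement) =====
-- stated objective: alternative
-- what changed: B scans the stack forward once recording the last focused index and derives the offset by length arithmetic, instead of A's reverse-copy of the stack with an early-return first-match scan.
import Mathlib
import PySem

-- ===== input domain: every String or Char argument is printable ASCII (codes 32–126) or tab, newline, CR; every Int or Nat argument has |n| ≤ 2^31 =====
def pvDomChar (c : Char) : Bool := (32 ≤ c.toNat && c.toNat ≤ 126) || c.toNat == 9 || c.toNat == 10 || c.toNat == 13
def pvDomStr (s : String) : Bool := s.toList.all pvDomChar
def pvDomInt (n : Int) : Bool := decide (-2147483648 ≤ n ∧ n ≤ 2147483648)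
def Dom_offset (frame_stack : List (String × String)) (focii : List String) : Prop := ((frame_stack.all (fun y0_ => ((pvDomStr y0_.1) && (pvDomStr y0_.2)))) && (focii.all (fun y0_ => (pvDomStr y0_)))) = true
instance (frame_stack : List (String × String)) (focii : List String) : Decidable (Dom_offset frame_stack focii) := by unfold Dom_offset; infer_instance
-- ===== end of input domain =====

-- B replaces A's reverse-copy + early-return first-match scan by a single forward
-- scan recording the last focused index, then length arithmetic (alternative decomposition).

-- ===== PORT A =====
-- the for-loop with early 'return off': none = loop fell through
def offsetAux (focii : List String) : List String → Int → Option Int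
  | [], _ => none
  | frame :: rest, off =>
    if focii.contains frame then some off else offsetAux focii rest (off + 1)

def offset (frame_stack : List (String × String)) (focii : List String) : Int :=
  let fs := ((PySem.List.slice? frame_stack none none (-1)).getD []).map (fun x => x.1)
  match offsetAux focii fs 0 with
  | some off => off
  | none => (fs.length : Int)

-- ===== PORT B =====
def offset_alt (frame_stack : List (String × String)) (focii : List String) : Int :=
  let last := (PySem.List.enumerate frame_stack 0).foldl
    (fun acc p => if focii.contains p.2.1 then p.1 else acc) (-1)
  (frame_stack.length : Int) - 1 - last

-- ===== PRECONDITION & SPEC =====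
def Spec_offset (frame_stack : List (String × String)) (focii : List String) (out : Int) : Prop := out = offset_alt frame_stack focii
instance (frame_stack : List (String × String)) (focii : List String) (out : Int) : Decidable (Spec_offset frame_stack focii out) := by unfold Spec_offset; infer_instance

-- ===== CLAIM (what is proved, stated in full; the proofs are below) =====
def Claim_equal_offset : Prop := ∀ (frame_stack : List (String × String)) (focii : List String), Dom_offset frame_stack focii → Spec_offset frame_stack focii (offset frame_stack focii)

-- ===== LEMMAS AND PROOFS =====

theorem offsetAux_eq_findIdx? (focii : List String) (l : List String) (off : Int) :
    offsetAux focii l off =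
      (l.findIdx? (fun f => decide (f ∈ focii))).map (fun i => off + (i : Int)) := by
  induction l generalizing off with
  | nil => simp [offsetAux]
  | cons x xs ih =>
    simp only [offsetAux, ih, List.findIdx?_cons]
    by_cases h : x ∈ focii
    · simp [h]
    · cases hx : xs.findIdx? (fun f => decide (f ∈ focii)) <;> simp [h, hx] <;> omega

theorem fold_last_eq (focii : List String) (l : List (String × String)) (s acc : Int) :
    (PySem.List.enumerate l s).foldl
      (fun acc p => if focii.contains p.2.1 then p.1 else acc) acc =
    (((l.map Prod.fst).reverse.findIdx? (fun f => decide (f ∈ focii))).map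
      (fun i => s + (l.length : Int) - 1 - (i : Int))).getD acc := by
  induction l using List.reverseRecOn generalizing acc with
  | nil => simp [PySem.List.enumerate]
  | append_singleton xs x ih =>
    rw [PySem.List.enumerate_append, List.foldl_append]
    simp only [PySem.List.enumerate, List.foldl_cons, List.foldl_nil, List.map_append,
      List.reverse_append, List.map_cons, List.map_nil, List.singleton_append,
      List.findIdx?_cons, ih]
    by_cases h : x.1 ∈ focii <;>
      cases hx : (xs.map Prod.fst).reverse.findIdx? (fun f => decide (f ∈ focii)) <;>
        simp [List.findIdx?_cons, h, hx] <;> push_cast <;> omega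

-- ===== VERDICT (by name: the statement is the Claim_ definition above) =====
theorem offset_spec : Claim_equal_offset := by
  intro fs focii _
  unfold Spec_offset offset offset_alt
  rw [PySem.List.slice?_none_none_neg_one]
  simp only [Option.getD_some, List.map_reverse, offsetAux_eq_findIdx?, fold_last_eq]
  cases hf : (fs.map Prod.fst).reverse.findIdx? (fun f => decide (f ∈ focii)) <;>
    simp [hf] <;> push_cast <;> omega
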